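-- pv_equiv track=rewrite | github.com/Zyora-Dev/zse | zse/models/loader/streaming.py | _build_name_map
-- ===== SOURCE A (Python) =====
-- from typing import Dict, List, Optional, Iterator, Tuple, Any, Callable
--
-- def _build_name_map(
--
--     file_names: List[str],
--     model_keys: set,
-- ) -> Dict[str, str]:
--     """Build mapping from file tensor names to model param names."""
--     name_map = {}
--
--     for name in file_names:
--         # Try direct match first
--         if name in model_keys:
--             name_map[name] = name
--             continue
--
--         # Try without "model." prefix
--         if name.startswith("model."):
--             stripped = name[6:]
--             if stripped in model_keys:
--                 name_map[name] = stripped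
--                 continue
--
--         # Try adding "model." prefix
--         prefixed = "model." + name
--         if prefixed in model_keys:
--             name_map[name] = prefixed
--             continue
--
--         # Common HF -> local transformations
--         transformed = name
--         transforms = [
--             ("model.", ""),
--             ("self_attn.", "attention."),
--             ("mlp.", "feed_forward."),
--         ]
--         for old, new in transforms:
--             transformed = transformed.replace(old, new)
--
--         if transformed in model_keys:
--             name_map[name] = transformed
--
--     return name_map
-- ===== SOURCE B (Python) =====
-- def _build_name_map(file_names, model_keys):
--     """Build mapping from file tensor names to model param names."""
--     # Staged worklist: each pass maps one candidate form over the whole list of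
--     # still-unresolved names, instead of a per-name branch cascade.
--     stages = [
--         lambda n: n,
--         lambda n: n[6:] if n.startswith("model.") else None,
--         lambda n: "model." + n,
--         lambda n: n.replace("model.", "")
--                    .replace("self_attn.", "attention.")
--                    .replace("mlp.", "feed_forward."),
--     ]
--     resolved = {}
--     pending = list(file_names)
--     for stage in stages:
--         still = []
--         for n in pending:
--             c = stage(n)
--             if c is not None and c in model_keys:
--                 resolved[n] = c
--             else:
--                 still.append(n)
--         pending = still
--     return {n: resolved[n] for n in file_names if n in resolved}
-- ===== Notes on version B (the rewrite author's own statement) =====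
-- stated objective: alternative
-- what changed: Replaced A's per-name if/continue cascade by a staged worklist algorithm: four whole-list passes (direct, stripped, prefixed, transformed) each resolve what they can into a dict and carry the rest forward in a pending list, and a final comprehension over file_names restores insertion order.
import Mathlib
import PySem

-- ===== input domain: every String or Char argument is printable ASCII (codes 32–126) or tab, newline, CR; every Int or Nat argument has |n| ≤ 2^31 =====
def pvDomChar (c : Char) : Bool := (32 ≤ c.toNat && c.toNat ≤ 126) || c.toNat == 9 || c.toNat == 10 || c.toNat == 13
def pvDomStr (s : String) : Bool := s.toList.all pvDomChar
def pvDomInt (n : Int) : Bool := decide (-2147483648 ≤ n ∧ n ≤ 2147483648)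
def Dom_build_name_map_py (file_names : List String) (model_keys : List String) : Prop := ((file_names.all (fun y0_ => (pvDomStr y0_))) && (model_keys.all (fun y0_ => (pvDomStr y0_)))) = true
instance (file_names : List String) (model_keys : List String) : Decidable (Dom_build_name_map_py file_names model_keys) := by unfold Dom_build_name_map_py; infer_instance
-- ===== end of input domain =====

-- B replaces A's per-name if/continue branch cascade by a staged worklist algorithm
-- (four whole-list passes, then a reassembly pass); objective: alternative, same cost.
-- model_keys is a Python set, represented as a List String of distinct elements.

-- ===== PORT A =====
-- step of A's for-loop body: the branch cascade with `continue`
def pvStepA (model_keys : List String) (d : PySem.Dict String String) (name : String) :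
    PySem.Dict String String :=
  if model_keys.contains name then d.insert name name
  else
    -- try without "model." prefix
    let afterStrip :=
      if PySem.Str.startswith name "model." then
        let stripped := PySem.Str.slice name (some 6) none
        if model_keys.contains stripped then some (d.insert name stripped) else none
      else none
    match afterStrip with
    | some d' => d'
    | none =>
      let prefixed := "model." ++ name
      if model_keys.contains prefixed then d.insert name prefixed
      else
        -- common HF -> local transformations, applied sequentially over the transforms list
        let transformed :=
          [("model.", ""), ("self_attn.", "attention."), ("mlp.", "feed_forward.")].foldl
            (fun t p => PySem.Str.replace t p.1 p.2) name
        if model_keys.contains transformed then d.insert name transformed else d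

def build_name_map_py (file_names : List String) (model_keys : List String) : List (String × String) :=
  (file_names.foldl (pvStepA model_keys) PySem.Dict.empty).items

-- ===== PORT B =====
-- B's four stage functions: each produces one candidate form (or None)
def pvStageFns : List (String → Option String) :=
  [fun n => some n,
   fun n => if PySem.Str.startswith n "model." then some (PySem.Str.slice n (some 6) none) else none,
   fun n => some ("model." ++ n),
   fun n => some (PySem.Str.replace
                    (PySem.Str.replace (PySem.Str.replace n "model." "")
                      "self_attn." "attention.")
                    "mlp." "feed_forward.")]

-- body of the inner worklist loop: resolve n via this stage, or keep it pending
def pvStageStep (model_keys : List String) (stage : String → Option String)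
    (acc : PySem.Dict String String × List String) (n : String) :
    PySem.Dict String String × List String :=
  match stage n with
  | some c =>
      if model_keys.contains c then (acc.1.insert n c, acc.2) else (acc.1, acc.2 ++ [n])
  | none => (acc.1, acc.2 ++ [n])

-- one pass of the worklist loop
def pvRunStage (model_keys : List String)
    (st : PySem.Dict String String × List String) (stage : String → Option String) :
    PySem.Dict String String × List String :=
  st.2.foldl (pvStageStep model_keys stage) (st.1, [])

def build_name_map_py_alt (file_names : List String) (model_keys : List String) : List (String × String) :=
  let final := pvStageFns.foldl (pvRunStage model_keys) (PySem.Dict.empty, file_names)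
  -- {n: resolved[n] for n in file_names if n in resolved}
  (file_names.foldl
    (fun out n =>
      match final.1.get? n with
      | some c => out.insert n c
      | none => out)
    PySem.Dict.empty).items

-- ===== PRECONDITION & SPEC =====
def Spec_build_name_map_py (file_names : List String) (model_keys : List String) (out : List (String × String)) : Prop := out = build_name_map_py_alt file_names model_keys
instance (file_names : List String) (model_keys : List String) (out : List (String × String)) : Decidable (Spec_build_name_map_py file_names model_keys out) := by unfold Spec_build_name_map_py; infer_instance

-- ===== CLAIM (what is proved, stated in full; the proofs are below) =====
def Claim_equal_build_name_map_py : Prop := ∀ (file_names : List String) (model_keys : List String), Dom_build_name_map_py file_names model_keys → Spec_build_name_map_py file_names model_keys (build_name_map_py file_names model_keys)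

-- ===== LEMMAS AND PROOFS =====

-- proof-side helper: does this stage resolve this name?
def pvHit (model_keys : List String) (stage : String → Option String) (n : String) : Option String :=
  match stage n with
  | some c => if model_keys.contains c then some c else none
  | none => none

-- proof-side helper: first stage in L that resolves n
def pvResolveL (model_keys : List String) (L : List (String → Option String)) (n : String) : Option String :=
  match L with
  | [] => none
  | s :: L' =>
    match pvHit model_keys s n with
    | some c => some c
    | none => pvResolveL model_keys L' n

-- one pass of the worklist, lookup/membership semantics (by induction on the pending list)
lemma pvStage_fold (model_keys : List String) (s : String → Option String)
    (p : List String) (d : PySem.Dict String String) (acc : List String) (n : String) :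
    ((p.foldl (pvStageStep model_keys s) (d, acc)).1.get? n
      = if n ∈ p ∧ (pvHit model_keys s n).isSome then pvHit model_keys s n else d.get? n)
    ∧ (n ∈ (p.foldl (pvStageStep model_keys s) (d, acc)).2
      ↔ (n ∈ acc ∨ (n ∈ p ∧ pvHit model_keys s n = none))) := by
  induction p generalizing d acc with
  | nil => simp
  | cons m p ih =>
    simp only [List.foldl_cons]
    by_cases hmn : n = m
    · subst hmn
      cases hs : s n with
      | none =>
        have hh : pvHit model_keys s n = none := by simp [pvHit, hs]
        rcases ih d (acc ++ [n]) with ⟨ih1, ih2⟩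
        refine ⟨?_, ?_⟩
        · rw [pvStageStep, hs, ih1]; simp [hh]
        · rw [pvStageStep, hs, ih2]; simp [hh]
      | some c =>
        by_cases hc : c ∈ model_keys
        · have hh : pvHit model_keys s n = some c := by simp [pvHit, hs, hc]
          rcases ih (d.insert n c) acc with ⟨ih1, ih2⟩
          refine ⟨?_, ?_⟩
          · rw [show pvStageStep model_keys s (d, acc) n = (d.insert n c, acc) by
                simp [pvStageStep, hs, hc], ih1]
            by_cases hp : n ∈ p ∧ (pvHit model_keys s n).isSome
            · simp [hp, hh]
            · simp [hh, PySem.Dict.get?_insert_self]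
          · rw [show pvStageStep model_keys s (d, acc) n = (d.insert n c, acc) by
                simp [pvStageStep, hs, hc], ih2]
            simp [hh]
        · have hh : pvHit model_keys s n = none := by simp [pvHit, hs, hc]
          rcases ih d (acc ++ [n]) with ⟨ih1, ih2⟩
          refine ⟨?_, ?_⟩
          · rw [show pvStageStep model_keys s (d, acc) n = (d, acc ++ [n]) by
                simp [pvStageStep, hs, hc], ih1]
            simp [hh]
          · rw [show pvStageStep model_keys s (d, acc) n = (d, acc ++ [n]) by
                simp [pvStageStep, hs, hc], ih2]
            simp [hh]
    · -- n ≠ m: this step only touches key m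
      cases hs : s m with
      | none =>
        rcases ih d (acc ++ [m]) with ⟨ih1, ih2⟩
        refine ⟨?_, ?_⟩
        · rw [pvStageStep, hs, ih1]; simp [hmn]
        · rw [pvStageStep, hs, ih2]; simp [hmn]
      | some c =>
        by_cases hc : c ∈ model_keys
        · rcases ih (d.insert m c) acc with ⟨ih1, ih2⟩
          refine ⟨?_, ?_⟩
          · rw [show pvStageStep model_keys s (d, acc) m = (d.insert m c, acc) by
                simp [pvStageStep, hs, hc], ih1,
              PySem.Dict.get?_insert_of_ne _ _ hmn]
            simp [hmn]
          · rw [show pvStageStep model_keys s (d, acc) m = (d.insert m c, acc) by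
                simp [pvStageStep, hs, hc], ih2]
            simp [hmn]
        · rcases ih d (acc ++ [m]) with ⟨ih1, ih2⟩
          refine ⟨?_, ?_⟩
          · rw [show pvStageStep model_keys s (d, acc) m = (d, acc ++ [m]) by
                simp [pvStageStep, hs, hc], ih1]
            simp [hmn]
          · rw [show pvStageStep model_keys s (d, acc) m = (d, acc ++ [m]) by
                simp [pvStageStep, hs, hc], ih2]
            simp [hmn]

-- running a list of stages: final-dict lookup = first matching stage
lemma pvRun_get? (model_keys : List String) (L : List (String → Option String))
    (d : PySem.Dict String String) (p : List String) (n : String) :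
    (L.foldl (pvRunStage model_keys) (d, p)).1.get? n
      = if n ∈ p ∧ (pvResolveL model_keys L n).isSome then pvResolveL model_keys L n
        else d.get? n := by
  induction L generalizing d p with
  | nil => simp [pvResolveL]
  | cons s L ih =>
    simp only [List.foldl_cons]
    have hst := pvStage_fold model_keys s p d [] n
    have hrw : pvRunStage model_keys (d, p) s
        = ((p.foldl (pvStageStep model_keys s) (d, [])).1,
           (p.foldl (pvStageStep model_keys s) (d, [])).2) := rfl
    rw [hrw, ih, hst.1]
    have h2 := hst.2
    simp only [List.not_mem_nil, false_or] at h2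
    simp only [h2]
    cases hh : pvHit model_keys s n with
    | some c => simp [pvResolveL, hh]
    | none =>
      simp only [pvResolveL, hh]
      by_cases hp : n ∈ p <;> simp [hp]

-- the cascade of A, as an optional resolved target
def pvResolve (model_keys : List String) (name : String) : Option String :=
  if model_keys.contains name then some name
  else if PySem.Str.startswith name "model."
          && model_keys.contains (PySem.Str.slice name (some 6) none) then
    some (PySem.Str.slice name (some 6) none)
  else if model_keys.contains ("model." ++ name) then some ("model." ++ name)
  else
    let t := PySem.Str.replace
      (PySem.Str.replace (PySem.Str.replace name "model." "") "self_attn." "attention.")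
      "mlp." "feed_forward."
    if model_keys.contains t then some t else none

-- B's stage list resolves exactly as A's cascade
lemma pvResolveL_stages (model_keys : List String) (n : String) :
    pvResolveL model_keys pvStageFns n = pvResolve model_keys n := by
  by_cases h1 : n ∈ model_keys <;>
    by_cases h2 : PySem.Chars.startswith n.toList ['m','o','d','e','l','.'] = true <;>
    by_cases h3 : PySem.Str.slice n (some 6) none ∈ model_keys <;>
    by_cases h4 : ("model." ++ n) ∈ model_keys <;>
    by_cases h5 : PySem.Str.replace
        (PySem.Str.replace (PySem.Str.replace n "model." "")
          "self_attn." "attention.") "mlp." "feed_forward." ∈ model_keys <;>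
    simp [pvStageFns, pvResolveL, pvHit, pvResolve, h1, h2, h3, h4, h5]

-- A's loop body, phrased through pvResolve
lemma pvStepA_eq (model_keys : List String) (d : PySem.Dict String String) (name : String) :
    pvStepA model_keys d name =
      match pvResolve model_keys name with
      | some tgt => d.insert name tgt
      | none => d := by
  unfold pvStepA pvResolve
  simp only [List.foldl]
  by_cases h1 : name ∈ model_keys
  · simp [h1]
  · by_cases h2 : PySem.Chars.startswith name.toList ['m','o','d','e','l','.'] = true <;>
      by_cases h3 : PySem.Str.slice name (some 6) none ∈ model_keys <;>
      by_cases h4 : ("model." ++ name) ∈ model_keys <;>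
      by_cases h5 : PySem.Str.replace
        (PySem.Str.replace (PySem.Str.replace name "model." "")
          "self_attn." "attention.") "mlp." "feed_forward." ∈ model_keys <;>
      simp [h1, h2, h3, h4, h5]

-- ===== VERDICT (by name: the statement is the Claim_ definition above) =====
theorem build_name_map_py_spec : Claim_equal_build_name_map_py := by
  intro file_names model_keys _
  unfold Spec_build_name_map_py build_name_map_py build_name_map_py_alt
  congr 1
  apply PySem.List.foldl_congr_mem
  intro d n hn
  rw [pvStepA_eq, pvRun_get?, pvResolveL_stages]
  cases pvResolve model_keys n with
  | some c => simp [hn]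
  | none => simp [hn]
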